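-- pv_equiv track=rewrite | github.com/gitouni/Targetless-LiDAR-camera-calibration | clique_utils.py | detect_clique
-- ===== SOURCE A (Python) =====
-- from copy import deepcopy
--
-- def detect_clique(clique_idx:list,clique_list:list,min_num:int,max_num:int):
--     clique_idx.sort()
--     tmp_idx = clique_idx[0]
--     tmp_clique = []
--     for idx in clique_idx:
--         if idx <= tmp_idx + 1:
--             tmp_clique.append(idx)
--         else:
--             if min_num <= len(tmp_clique) <= max_num + min_num:
--                 clique_list.append(deepcopy(tmp_clique))
--             elif len(tmp_clique) > max_num + min_num:
--                 while len(tmp_clique) > max_num + min_num: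
--                     clique_list.append(deepcopy(tmp_clique[:max_num]))
--                     tmp_clique = tmp_clique[max_num:]
--                 clique_list.append(tmp_clique)
--             tmp_clique = [idx]
--         tmp_idx = idx
--     if min_num <= len(tmp_clique) <= max_num + min_num:
--         clique_list.append(deepcopy(tmp_clique))
--     elif len(tmp_clique) > max_num + min_num:
--         while len(tmp_clique) > max_num + min_num:
--             clique_list.append(deepcopy(tmp_clique[:max_num]))
--             tmp_clique = tmp_clique[max_num:]
--         clique_list.append(tmp_clique)
--     return clique_list
-- ===== SOURCE B (Python) =====
-- def _chunks(run, min_num, max_num):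
--     # chunk boundaries computed arithmetically: k full chunks of max_num, then the remainder
--     L = len(run)
--     bound = max_num + min_num
--     if L < min_num:
--         return []
--     if L <= bound:
--         return [run]
--     k = -((bound - L) // max_num)  # ceil((L - bound) / max_num)
--     return [run[i * max_num:(i + 1) * max_num] for i in range(k)] + [run[k * max_num:]]
--
-- def detect_clique(clique_idx: list, clique_list: list, min_num: int, max_num: int):
--     clique_idx.sort()
--     n = len(clique_idx)
--     cuts = [0] + [i for i in range(1, n) if clique_idx[i] > clique_idx[i - 1] + 1] + [n]
--     for a, b in zip(cuts, cuts[1:]):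
--         clique_list += _chunks(clique_idx[a:b], min_num, max_num)
--     return clique_list
-- ===== Notes on version B (the rewrite author's own statement) =====
-- stated objective: alternative
-- what changed: B finds run boundaries with an index comprehension over the sorted list and emits each run's chunks from a closed-form ceiling-division chunk count with arithmetic slice bounds, replacing A's stateful loop whose while-loop repeatedly peels and reslices the current clique.
-- outside the precondition, e.g. on detect_clique([0, 1, 2, 3], [], 5, -2): A returns [[0, 1], [2, 3]], B returns []
import Mathlib
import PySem

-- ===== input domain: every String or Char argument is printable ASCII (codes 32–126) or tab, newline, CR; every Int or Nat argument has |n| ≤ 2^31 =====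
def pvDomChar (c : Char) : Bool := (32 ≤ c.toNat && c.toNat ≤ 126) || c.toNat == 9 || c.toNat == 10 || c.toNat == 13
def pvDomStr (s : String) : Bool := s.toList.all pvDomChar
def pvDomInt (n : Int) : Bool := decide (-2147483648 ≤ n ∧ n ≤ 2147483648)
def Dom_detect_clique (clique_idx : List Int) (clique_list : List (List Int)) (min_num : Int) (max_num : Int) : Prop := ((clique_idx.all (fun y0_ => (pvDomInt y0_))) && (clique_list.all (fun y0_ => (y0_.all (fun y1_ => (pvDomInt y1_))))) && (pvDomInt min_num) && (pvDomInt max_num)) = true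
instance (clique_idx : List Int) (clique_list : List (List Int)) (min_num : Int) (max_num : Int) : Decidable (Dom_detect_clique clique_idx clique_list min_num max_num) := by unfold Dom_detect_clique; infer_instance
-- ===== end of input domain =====

-- B computes run boundaries as an index comprehension over the sorted list and emits each run's
-- chunks from a closed-form ceiling-division chunk count with arithmetic slice bounds, replacing
-- A's stateful loop with its repeated-reslicing while-peel (objective: alternative). Return-value
-- equivalence only: like A, B sorts clique_idx in place and extends clique_list (same mutations).


-- ===== PORT A =====
-- A's inner `while len(tmp_clique) > max_num + min_num` loop; fuel = tmp.length suffices on Pre_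
-- (each iteration drops max_num ≥ 1 elements and the bound is ≥ 0 there).
def pvPeelA (mn mx : Int) : Nat → List Int → List (List Int) → List (List Int) × List Int
  | 0, tmp, acc => (acc, tmp)
  | f + 1, tmp, acc =>
    if (tmp.length : Int) > mx + mn then
      pvPeelA mn mx f (PySem.List.slice tmp (some mx) none)
        (acc ++ [PySem.List.slice tmp none (some mx)])
    else (acc, tmp)

-- A's duplicated emit block (the if/elif after the for-loop and inside its else branch).
def pvEmitA (mn mx : Int) (tmp : List Int) (acc : List (List Int)) : List (List Int) :=
  if mn ≤ (tmp.length : Int) ∧ (tmp.length : Int) ≤ mx + mn then acc ++ [tmp]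
  else if (tmp.length : Int) > mx + mn then
    let r := pvPeelA mn mx tmp.length tmp acc
    r.1 ++ [r.2]
  else acc

-- A's for-loop body; state = (clique_list, tmp_clique, tmp_idx).
def pvStepA (mn mx : Int) (st : List (List Int) × List Int × Int) (idx : Int) :
    List (List Int) × List Int × Int :=
  if idx ≤ st.2.2 + 1 then (st.1, st.2.1 ++ [idx], idx)
  else (pvEmitA mn mx st.2.1 st.1, [idx], idx)

def detect_clique (clique_idx : List Int) (clique_list : List (List Int)) (min_num : Int) (max_num : Int) : List (List Int) :=
  let s := PySem.List.sorted clique_idx (fun x => x) false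
  match s with
  | [] => clique_list  -- Python raises IndexError at clique_idx[0]; excluded by Pre_
  | t0 :: _ =>
    let st := s.foldl (pvStepA min_num max_num) (clique_list, ([], t0))
    pvEmitA min_num max_num st.2.1 st.1

-- ===== PORT B =====
-- Source B's _chunks: k = ceil((L - bound)/max_num) full chunks by arithmetic slice bounds, then the rest.
def pvChunksB (run : List Int) (mn mx : Int) : List (List Int) :=
  if (run.length : Int) < mn then []
  else if (run.length : Int) ≤ mx + mn then [run]
  else
    ((PySem.List.pyRange 0 (-(PySem.Int.floordiv ((mx + mn) - run.length) mx)) 1).map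
      (fun i => PySem.List.slice run (some (i * mx)) (some ((i + 1) * mx)))) ++
    [PySem.List.slice run (some ((-(PySem.Int.floordiv ((mx + mn) - run.length) mx)) * mx)) none]

-- Source B's break test `clique_idx[i] > clique_idx[i-1] + 1` (i always in range in the comprehension).
def pvBreakB (s : List Int) (i : Int) : Bool :=
  match PySem.List.pyGet? s i, PySem.List.pyGet? s (i - 1) with
  | some a, some b => decide (a > b + 1)
  | _, _ => false

def detect_clique_alt (clique_idx : List Int) (clique_list : List (List Int)) (min_num : Int) (max_num : Int) : List (List Int) :=
  let s := PySem.List.sorted clique_idx (fun x => x) false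
  let cuts := 0 :: ((PySem.List.pyRange 1 (s.length : Int) 1).filter (pvBreakB s) ++ [(s.length : Int)])
  (cuts.zip cuts.tail).foldl
    (fun acc p => acc ++ pvChunksB (PySem.List.slice s (some p.1) (some p.2)) min_num max_num)
    clique_list

-- ===== PRECONDITION & SPEC =====
-- Pre_ excludes the empty list (A raises IndexError) and the parameter combinations
-- (max_num ≤ 0 or max_num + min_num < 0, with the list long enough that A's chunking loop can
-- trigger) where A either loops forever or returns chunks cut by a nonpositive / negative slice
-- bound that no caller of this size-bounded grouping would specify; on part of those A still
-- returns a value (see the cite in claim.json).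
def Pre_detect_clique (clique_idx : List Int) (clique_list : List (List Int)) (min_num : Int) (max_num : Int) : Prop :=
  clique_idx ≠ [] ∧
    ((1 ≤ max_num ∧ 0 ≤ max_num + min_num) ∨ (clique_idx.length : Int) ≤ max_num + min_num)
instance (clique_idx : List Int) (clique_list : List (List Int)) (min_num : Int) (max_num : Int) : Decidable (Pre_detect_clique clique_idx clique_list min_num max_num) := by unfold Pre_detect_clique; infer_instance

def pvWitness_detect_clique : List Int × List (List Int) × Int × Int := ([1, 2, 5, 9, 10], [[0]], 1, 2)

def Spec_detect_clique (clique_idx : List Int) (clique_list : List (List Int)) (min_num : Int) (max_num : Int) (out : List (List Int)) : Prop := out = detect_clique_alt clique_idx clique_list min_num max_num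
instance (clique_idx : List Int) (clique_list : List (List Int)) (min_num : Int) (max_num : Int) (out : List (List Int)) : Decidable (Spec_detect_clique clique_idx clique_list min_num max_num out) := by unfold Spec_detect_clique; infer_instance

-- ===== CLAIM (what is proved, stated in full; the proofs are below) =====
def Claim_equal_detect_clique : Prop := ∀ (clique_idx : List Int) (clique_list : List (List Int)) (min_num : Int) (max_num : Int), Dom_detect_clique clique_idx clique_list min_num max_num → Pre_detect_clique clique_idx clique_list min_num max_num → Spec_detect_clique clique_idx clique_list min_num max_num (detect_clique clique_idx clique_list min_num max_num)

-- ===== LEMMAS AND PROOFS =====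

-- Proof-side view of both programs: the runs of the sorted list, by direct recursion.
def pvGrp : Int → List Int → List Int → List (List Int)
  | _, cur, [] => [cur]
  | prev, cur, x :: xs => if x ≤ prev + 1 then pvGrp x (cur ++ [x]) xs else cur :: pvGrp x [x] xs

-- Break positions of the suffix xs (preceded by prev), first index i.
def pvBrk : Int → Int → List Int → List Int
  | _, _, [] => []
  | i, prev, x :: xs => if x > prev + 1 then i :: pvBrk (i + 1) x xs else pvBrk (i + 1) x xs

-- The pieces of s cut at a :: bs :: … :: length.
def pvParts (s : List Int) : Int → List Int → List (List Int)
  | a, [] => [PySem.List.slice s (some a) (some (s.length : Int))]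
  | a, b :: bs => PySem.List.slice s (some a) (some b) :: pvParts s b bs

lemma pv_slice_shift (l : List Int) (c a : Int) (hc : 0 ≤ c) (ha : 0 ≤ a) (b : Int) (hb : 0 ≤ b) :
    PySem.List.slice l (some (c + a)) (some (c + b)) =
      PySem.List.slice (l.drop c.toNat) (some a) (some b) := by
  rw [PySem.List.slice_toNat _ (by omega) (by omega),
      PySem.List.slice_toNat _ ha hb, List.drop_drop]
  congr 1
  · omega
  · congr 1; omega

lemma pv_slice_shift_none (l : List Int) (c a : Int) (hc : 0 ≤ c) (ha : 0 ≤ a) :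
    PySem.List.slice l (some (c + a)) none =
      PySem.List.slice (l.drop c.toNat) (some a) none := by
  rw [PySem.List.slice_from _ (by omega : (0:Int) ≤ c + a), PySem.List.slice_from _ ha,
      List.drop_drop]
  congr 1; omega

-- closed-form chunks peel one step at a time
lemma pvChunksB_step (run : List Int) (mn mx : Int) (hmx : 1 ≤ mx) (hb : 0 ≤ mx + mn)
    (hL : (run.length : Int) > mx + mn) :
    pvChunksB run mn mx =
      PySem.List.slice run none (some mx) ::
        pvChunksB (PySem.List.slice run (some mx) none) mn mx := by
  have hmx0 : (0:Int) < mx := by omega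
  have hrun' : PySem.List.slice run (some mx) none = run.drop mx.toNat :=
    PySem.List.slice_from _ (by omega)
  have hl' : ((run.drop mx.toNat).length : Int) = ((run.length - mx.toNat : Nat) : Int) := by
    simp [List.length_drop]
  have hmxn : (mx.toNat : Int) = mx := by omega
  have ha : (mx + mn) - (run.length : Int) = -((run.length : Int) - (mx + mn)) := by ring
  have ha' : (mx + mn) - ((run.drop mx.toNat).length : Int) =
      -(((run.drop mx.toNat).length : Int) - (mx + mn)) := by ring
  simp only [pvChunksB, hrun']
  by_cases h2 : ((run.drop mx.toNat).length : Int) > mx + mn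
  · -- still long after one peel
    have hK'def : -(PySem.Int.floordiv
        (-(((run.drop mx.toNat).length : Int) - (mx + mn))) mx) =
        -(PySem.Int.floordiv ((mx + mn) - ((run.drop mx.toNat).length : Int)) mx) := by
      rw [ha']
    have hK'brk := (PySem.Int.neg_floordiv_neg_eq_iff_of_pos hmx0).mp hK'def
    set K' := -(PySem.Int.floordiv ((mx + mn) - ((run.drop mx.toNat).length : Int)) mx) with hK'
    have hK'pos : 0 < K' := by nlinarith [hK'brk.1, hK'brk.2]
    have hLL' : ((run.drop mx.toNat).length : Int) = (run.length : Int) - mx := by omega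
    have hKK' : -(PySem.Int.floordiv ((mx + mn) - (run.length : Int)) mx) = K' + 1 := by
      rw [ha]
      refine (PySem.Int.neg_floordiv_neg_eq_iff_of_pos hmx0).mpr ⟨?_, ?_⟩
      · have h1 := hK'brk.1; rw [hLL'] at h1; nlinarith
      · have h1 := hK'brk.2; rw [hLL'] at h1; nlinarith
    rw [if_neg (by omega), if_neg (by omega), if_neg (by omega), if_neg (by omega), hKK',
      PySem.List.pyRange_one_cons (by omega)]
    simp only [List.map_cons, List.cons_append]
    rw [show ((0:Int) + 1) = 1 by norm_num]
    congr 1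
    · norm_num
    congr 1
    · -- the shifted full chunks
      rw [PySem.List.pyRange_one 1 (K' + 1), PySem.List.pyRange_one 0 K']
      have : ((K' + 1 - 1).toNat) = (K' - 0).toNat := by omega
      rw [this, List.map_map, List.map_map]
      refine List.map_congr_left ?_
      intro j hj
      simp only [Function.comp_apply]
      have e1 : (1 + (j:Int) + 1) * mx = mx + ((j:Int) + 1) * mx := by ring
      have e2 : (1 + (j:Int)) * mx = mx + (j:Int) * mx := by ring
      have e3 : (0 + (j:Int)) * mx = (j:Int) * mx := by ring
      have e4 : (0 + (j:Int) + 1) * mx = ((j:Int) + 1) * mx := by ring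
      rw [e1, e2, e3, e4, pv_slice_shift run mx _ (by omega) (by positivity) _ (by positivity)]
    · -- the shifted remainder
      have e1 : (K' + 1) * mx = mx + K' * mx := by ring
      rw [e1, pv_slice_shift_none run mx _ (by omega) (by positivity)]
  · -- one peel finishes: K = 1
    have hK1 : -(PySem.Int.floordiv ((mx + mn) - (run.length : Int)) mx) = 1 := by
      rw [ha]
      exact (PySem.Int.neg_floordiv_neg_eq_iff_of_pos hmx0).mpr ⟨by omega, by omega⟩
    rw [if_neg (by omega), if_neg (by omega), if_neg (by omega), if_pos (by omega), hK1,
      PySem.List.pyRange_one_cons (by omega), PySem.List.pyRange_one_eq_nil (by omega)]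
    simp [hrun']

lemma pvPeelA_stop (mn mx : Int) (f : Nat) (tmp : List Int) (acc : List (List Int))
    (h : ¬ (tmp.length : Int) > mx + mn) : pvPeelA mn mx f tmp acc = (acc, tmp) := by
  cases f <;> simp [pvPeelA, h]

lemma pvPeelA_eq_chunks (mn mx : Int) (hmx : 1 ≤ mx) (hb : 0 ≤ mx + mn) :
    ∀ (f : Nat) (tmp : List Int) (acc : List (List Int)), tmp.length ≤ f →
      (tmp.length : Int) > mx + mn →
      (pvPeelA mn mx f tmp acc).1 ++ [(pvPeelA mn mx f tmp acc).2] =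
        acc ++ pvChunksB tmp mn mx := by
  intro f
  induction f with
  | zero =>
    intro tmp acc hf hL
    interval_cases h : tmp.length
    omega
  | succ f ih =>
    intro tmp acc hf hL
    rw [pvChunksB_step tmp mn mx (by omega) hb hL]
    simp only [pvPeelA]
    rw [if_pos hL]
    have hdrop : PySem.List.slice tmp (some mx) none = tmp.drop mx.toNat :=
      PySem.List.slice_from _ (by omega)
    by_cases h2 : ((PySem.List.slice tmp (some mx) none).length : Int) > mx + mn
    · rw [ih _ _ (by rw [hdrop]; simp [List.length_drop]; omega) h2]
      simp
    · rw [pvPeelA_stop mn mx f _ _ h2]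
      have h3 : ¬ ((PySem.List.slice tmp (some mx) none).length : Int) < mn := by
        rw [hdrop] at h2 ⊢
        have : (tmp.drop mx.toNat).length = tmp.length - mx.toNat := by simp
        omega
      simp only [pvChunksB]
      rw [if_neg h3, if_pos (by omega)]
      simp

-- A's emit block equals appending B's chunk list, for runs admitted by Pre_.
lemma pvEmitA_eq (mn mx : Int) (tmp : List Int) (acc : List (List Int))
    (h : (1 ≤ mx ∧ 0 ≤ mx + mn) ∨ (tmp.length : Int) ≤ mx + mn) :
    pvEmitA mn mx tmp acc = acc ++ pvChunksB tmp mn mx := by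
  unfold pvEmitA pvChunksB
  by_cases h1 : mn ≤ (tmp.length : Int) ∧ (tmp.length : Int) ≤ mx + mn
  · rw [if_pos h1, if_neg (by omega), if_pos h1.2]
  · rw [if_neg h1]
    by_cases h2 : (tmp.length : Int) > mx + mn
    · rw [if_pos h2]
      have := pvPeelA_eq_chunks mn mx (by omega) (by omega) tmp.length tmp acc le_rfl h2
      rw [this]
      simp only [pvChunksB]
    · rw [if_neg h2, if_pos (by omega)]
      simp

-- A's main loop with trailing emit = emitting every run of pvGrp.
lemma pvCoreA (mn mx : Int) :
    ∀ (rest : List Int) (acc : List (List Int)) (cur : List Int) (prev : Int),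
      ((1 ≤ mx ∧ 0 ≤ mx + mn) ∨ ((cur.length : Int) + rest.length ≤ mx + mn)) →
      pvEmitA mn mx (rest.foldl (pvStepA mn mx) (acc, cur, prev)).2.1
          (rest.foldl (pvStepA mn mx) (acc, cur, prev)).1 =
        (pvGrp prev cur rest).foldl (fun a r => a ++ pvChunksB r mn mx) acc := by
  intro rest
  induction rest with
  | nil =>
    intro acc cur prev h
    simp only [List.foldl_nil, pvGrp, List.foldl_cons]
    exact pvEmitA_eq mn mx cur acc (by simpa using h)
  | cons x rest ih =>
    intro acc cur prev h
    simp only [List.foldl_cons, pvStepA, pvGrp]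
    by_cases hx : x ≤ prev + 1
    · rw [if_pos hx, if_pos hx]
      have := ih acc (cur ++ [x]) x (by simp at h ⊢; omega)
      simpa using this
    · rw [if_neg hx, if_neg hx]
      simp only [List.foldl_cons]
      rw [ih (pvEmitA mn mx cur acc) [x] x (by simp at h ⊢; omega),
        pvEmitA_eq mn mx cur acc (by simp at h ⊢; omega)]

-- B's filtered index comprehension computes the break positions pvBrk.
lemma pvBrkFilter :
    ∀ (xs pre : List Int) (x : Int),
      (PySem.List.pyRange ((pre.length : Int) + 1) ((pre.length : Int) + 1 + xs.length) 1).filter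
          (pvBreakB (pre ++ x :: xs)) =
        pvBrk ((pre.length : Int) + 1) x xs := by
  intro xs
  induction xs with
  | nil =>
    intro pre x
    rw [PySem.List.pyRange_one_eq_nil (by simp)]
    rfl
  | cons x' xs ih =>
    intro pre x
    rw [PySem.List.pyRange_one_cons (by simp)]
    have hbv : pvBreakB (pre ++ x :: x' :: xs) ((pre.length : Int) + 1) = decide (x' > x + 1) := by
      unfold pvBreakB
      rw [show ((pre.length : Int) + 1) = ((pre.length : Int) + ((1 : Nat) : Int)) by norm_num,
        PySem.List.pyGet?_append_right pre (x :: x' :: xs) 1,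
        show ((pre.length : Int) + ((1 : Nat) : Int) - 1) = (pre.length : Int) by push_cast; ring,
        PySem.List.pyGet?_append_length]
      rfl
    have hs : pre ++ x :: x' :: xs = (pre ++ [x]) ++ x' :: xs := by simp
    have htail := ih (pre ++ [x]) x'
    rw [← hs] at htail
    simp only [List.length_append, List.length_cons, List.length_nil] at htail
    push_cast at htail
    have hbnd : ((pre.length : Int) + 1 + ((x' :: xs).length : Int)) =
        (pre.length : Int) + 1 + 1 + (xs.length : Int) := by
      simp only [List.length_cons]; push_cast; ring
    rw [List.filter_cons, hbv, hbnd]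
    simp only [pvBrk]
    by_cases hx : x' > x + 1
    · rw [if_pos (by simpa using hx), if_pos hx, htail]
    · rw [if_neg (by simpa using hx), if_neg hx, htail]

-- slicing at consecutive cut pairs = pvParts
lemma pvZipCuts (s : List Int) :
    ∀ (bs : List Int) (a : Int),
      ((a :: (bs ++ [(s.length : Int)])).zip (bs ++ [(s.length : Int)])).map
          (fun p => PySem.List.slice s (some p.1) (some p.2)) =
        pvParts s a bs := by
  intro bs
  induction bs with
  | nil => intro a; simp [pvParts]
  | cons b bs ih =>
    intro a
    simp only [List.cons_append, List.zip_cons_cons, List.map_cons, pvParts]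
    congr 1
    exact ih b

-- cutting at the break positions recovers the runs
lemma pvPartsBrk :
    ∀ (xs cur pre : List Int) (prev : Int),
      pvParts (pre ++ cur ++ xs) (pre.length : Int)
          (pvBrk ((pre.length : Int) + (cur.length : Int)) prev xs) =
        pvGrp prev cur xs := by
  intro xs
  induction xs with
  | nil =>
    intro cur pre prev
    simp only [pvBrk, pvGrp, pvParts, List.append_nil]
    rw [show ((pre.length : Int)) = ((pre.length : Nat) : Int) from rfl,
      show (((pre ++ cur).length : Nat) : Int) = (((pre.length + cur.length : Nat)) : Int) by simp,
      PySem.List.slice_natCast]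
    rw [show pre ++ cur = pre ++ (cur ++ []) by simp, List.drop_left]
    simp
  | cons x xs ih =>
    intro cur pre prev
    simp only [pvBrk, pvGrp]
    by_cases hx : x > prev + 1
    · rw [if_pos hx, if_neg (by omega)]
      simp only [pvParts]
      congr 1
      · -- the finished run
        rw [show ((pre.length : Int) + (cur.length : Int)) = (((pre.length + cur.length : Nat)) : Int) by push_cast; ring,
          show ((pre.length : Int)) = ((pre.length : Nat) : Int) from rfl,
          PySem.List.slice_natCast, List.append_assoc, List.drop_left]
        simp
      · have := ih [x] (pre ++ cur) x
        simp only [List.length_append, List.length_cons, List.length_nil] at this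
        push_cast at this
        rw [show (pre ++ cur) ++ [x] ++ xs = pre ++ cur ++ x :: xs by simp] at this
        rw [← this]
    · rw [if_neg hx, if_pos (by omega)]
      have := ih (cur ++ [x]) pre x
      simp only [List.length_append, List.length_cons, List.length_nil] at this
      push_cast at this
      rw [show pre ++ (cur ++ [x]) ++ xs = pre ++ cur ++ x :: xs by simp,
        show ((pre.length : Int) + ((cur.length : Int) + 1)) = ((pre.length : Int) + (cur.length : Int) + 1) by ring] at this
      exact this

-- fold of slice-then-chunk over the cut pairs = fold of chunk over the slices
lemma pvFoldSlice (s : List Int) (ps : List (Int × Int)) (mn mx : Int) (init : List (List Int)) :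
    ps.foldl (fun acc p => acc ++ pvChunksB (PySem.List.slice s (some p.1) (some p.2)) mn mx) init =
      (ps.map (fun p => PySem.List.slice s (some p.1) (some p.2))).foldl
        (fun acc r => acc ++ pvChunksB r mn mx) init := by
  rw [List.foldl_map]

-- ===== VERDICT (by name: the statement is the Claim_ definition above) =====
theorem detect_clique_spec : Claim_equal_detect_clique := by
  intro ci cl mn mx _ hpre
  unfold Spec_detect_clique detect_clique detect_clique_alt
  obtain ⟨hne, hbound⟩ := hpre
  have hlen : (PySem.List.sorted ci (fun x => x) false).length = ci.length :=
    PySem.List.length_sorted ci _ false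
  cases hs : PySem.List.sorted ci (fun x => x) false with
  | nil =>
    exact absurd (List.length_eq_zero_iff.mp (by rw [← hlen, hs]; rfl)) hne
  | cons t0 rest =>
    simp only [List.tail_cons]
    -- A side reduces to the emit-fold over the runs
    have hstep : pvStepA mn mx (cl, ([], t0)) t0 = (cl, ([t0], t0)) := by
      simp only [pvStepA]
      rw [if_pos (by omega)]
      simp
    rw [List.foldl_cons, hstep]
    have hlen' : ci.length = rest.length + 1 := by rw [← hlen, hs]; simp
    have hA := pvCoreA mn mx rest cl [t0] t0 (by
      rcases hbound with h | h
      · exact Or.inl h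
      · right
        rw [hlen'] at h
        simp only [List.length_cons, List.length_nil]
        push_cast at h ⊢
        omega)
    rw [hA]
    -- B side reduces to the same fold
    rw [pvFoldSlice]
    have hflt : (PySem.List.pyRange 1 (((t0 :: rest).length : Int)) 1).filter
        (pvBreakB (t0 :: rest)) = pvBrk 1 t0 rest := by
      have h := pvBrkFilter rest [] t0
      simp only [List.length_nil, List.nil_append, Nat.cast_zero, zero_add] at h
      rw [show (((t0 :: rest).length : Int)) = 1 + (rest.length : Int) by
        push_cast [List.length_cons]; ring]
      exact h
    rw [hflt, pvZipCuts (t0 :: rest) (pvBrk 1 t0 rest) 0]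
    have hparts := pvPartsBrk rest [t0] [] t0
    simp only [List.length_nil, List.length_cons, List.nil_append, Nat.cast_zero, Nat.cast_one,
      zero_add, List.singleton_append] at hparts
    rw [hparts]
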